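-- pv_equiv track=rewrite | github.com/ReznikovRoman/itmo-devops-masters-course | python/algos/9_1_graph_social.py | friends_second_level
-- ===== SOURCE A (Python) =====
-- from collections import deque
--
-- def friends_second_level(start, graph):
--     """Находит всех друзей второго уровня для пользователя start."""
--     visited = {start}
--     level = {start: 0}
--     queue = deque([start])
--     second_level = set()
--
--     while queue:
--         current = queue.popleft()
--         for friend in graph.get(current, []):
--             if friend not in visited:
--                 visited.add(friend)
--                 level[friend] = level[current] + 1
--                 queue.append(friend)
--                 if level[friend] == 2:
--                     second_level.add(friend)
--     return second_level
-- ===== SOURCE B (Python) =====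
-- def friends_second_level(start, graph):
--     """Two-hop expansion: distinct neighbors of start's direct friends,
--     minus start and the direct friends themselves."""
--     blocked = {start}
--     direct = []
--     for f in graph.get(start, []):
--         if f not in blocked:
--             blocked.add(f)
--             direct.append(f)
--     second = set()
--     for f in direct:
--         for g in graph.get(f, []):
--             if g not in blocked and g not in second:
--                 second.add(g)
--     return second
-- ===== Notes on version B (the rewrite author's own statement) =====
-- stated objective: simpler
-- what changed: Replaced the whole-component BFS (queue + level dict + visited bookkeeping) by a direct two-hop expansion: collect start's distinct direct friends, then scan only their adjacency lists, skipping start, the direct friends and already-found nodes.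
import Mathlib
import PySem

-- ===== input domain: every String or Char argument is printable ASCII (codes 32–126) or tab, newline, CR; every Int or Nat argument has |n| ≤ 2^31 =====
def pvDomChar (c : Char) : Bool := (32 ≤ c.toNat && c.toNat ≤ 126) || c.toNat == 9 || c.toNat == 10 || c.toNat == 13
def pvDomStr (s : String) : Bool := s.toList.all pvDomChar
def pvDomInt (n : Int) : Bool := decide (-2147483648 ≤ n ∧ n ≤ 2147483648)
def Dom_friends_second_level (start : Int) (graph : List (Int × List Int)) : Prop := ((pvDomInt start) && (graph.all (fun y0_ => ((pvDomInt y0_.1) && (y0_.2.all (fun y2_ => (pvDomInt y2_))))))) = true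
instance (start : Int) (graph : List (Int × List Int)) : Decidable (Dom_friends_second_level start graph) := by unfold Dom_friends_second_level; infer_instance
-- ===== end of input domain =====

-- B replaces A's whole-component BFS (queue + level dict) by a plain two-hop expansion:
-- neighbours of start's direct friends, minus start and the direct friends (objective: simpler).

-- shared helper: graph.get(x, []) on the association list (first match)
def pvAdj (graph : List (Int × List Int)) (x : Int) : List Int :=
  PySem.Dict.getD (PySem.Dict.mk graph) x []

-- ===== PORT A =====
-- state: (visited, level, queue, second_level)
def bfsVisit (graph : List (Int × List Int)) (current : Int)
    (st : PySem.Set Int × PySem.Dict Int Int × List Int × PySem.Set Int) (friend : Int) :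
    PySem.Set Int × PySem.Dict Int Int × List Int × PySem.Set Int :=
  if PySem.Set.contains st.1 friend then st
  else
    -- level[current]: every dequeued node has been assigned a level, so getD is exact here
    let lf := PySem.Dict.getD st.2.1 current 0 + 1
    (PySem.Set.add st.1 friend, PySem.Dict.insert st.2.1 friend lf, st.2.2.1 ++ [friend],
      if lf == 2 then PySem.Set.add st.2.2.2 friend else st.2.2.2)

-- the 'while queue:' loop; fuel only makes it total (it provably never runs out)
def bfsLoop (graph : List (Int × List Int)) :
    Nat → PySem.Set Int × PySem.Dict Int Int × List Int × PySem.Set Int → PySem.Set Int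
  | 0, st => st.2.2.2
  | fuel + 1, st =>
    match st.2.2.1 with
    | [] => st.2.2.2
    | current :: rest =>
      bfsLoop graph fuel
        (List.foldl (bfsVisit graph current) (st.1, st.2.1, rest, st.2.2.2) (pvAdj graph current))

def friends_second_level (start : Int) (graph : List (Int × List Int)) : List Int :=
  bfsLoop graph
    ((pvAdj graph start).length + graph.foldl (fun a p => a + 1 + p.2.length) 0 + 1)
    (PySem.Set.ofList [start], PySem.Dict.insert PySem.Dict.empty start 0, [start], PySem.Set.empty)

-- ===== PORT B =====
-- first loop: collect the distinct direct friends (≠ start), building blocked alongside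
def collectDirect (bd : PySem.Set Int × List Int) (f : Int) : PySem.Set Int × List Int :=
  if PySem.Set.contains bd.1 f then bd else (PySem.Set.add bd.1 f, bd.2 ++ [f])

def hopStep (blocked : PySem.Set Int) (second : PySem.Set Int) (g : Int) : PySem.Set Int :=
  if !PySem.Set.contains blocked g && !PySem.Set.contains second g then PySem.Set.add second g
  else second

def hopInner (graph : List (Int × List Int)) (blocked : PySem.Set Int)
    (second : PySem.Set Int) (f : Int) : PySem.Set Int :=
  List.foldl (hopStep blocked) second (pvAdj graph f)

def friends_second_level_alt (start : Int) (graph : List (Int × List Int)) : List Int :=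
  let bd := List.foldl collectDirect (PySem.Set.ofList [start], []) (pvAdj graph start)
  List.foldl (hopInner graph bd.1) PySem.Set.empty bd.2

-- ===== PRECONDITION & SPEC =====
def Spec_friends_second_level (start : Int) (graph : List (Int × List Int)) (out : List Int) : Prop := out = friends_second_level_alt start graph
instance (start : Int) (graph : List (Int × List Int)) (out : List Int) : Decidable (Spec_friends_second_level start graph out) := by unfold Spec_friends_second_level; infer_instance

-- ===== CLAIM (what is proved, stated in full; the proofs are below) =====
def Claim_equal_friends_second_level : Prop := ∀ (start : Int) (graph : List (Int × List Int)), Dom_friends_second_level start graph → Spec_friends_second_level start graph (friends_second_level start graph)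

-- ===== LEMMAS AND PROOFS =====

-- Once every queued node is at level ≥ 2, the BFS never adds to second_level again.
lemma pv_phase2_inner (graph : List (Int × List Int)) (f : Int) :
    ∀ (l : List Int) (vis : PySem.Set Int) (level : PySem.Dict Int Int) (q : List Int)
      (sec : PySem.Set Int),
      f ∈ vis → 2 ≤ PySem.Dict.getD level f 0 →
      (∀ x ∈ q, x ∈ vis) → (∀ x ∈ q, 2 ≤ PySem.Dict.getD level x 0) →
      ∃ vis' level' q',
        List.foldl (bfsVisit graph f) (vis, level, q, sec) l = (vis', level', q', sec)
        ∧ (∀ x ∈ q', x ∈ vis') ∧ (∀ x ∈ q', 2 ≤ PySem.Dict.getD level' x 0) := by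
  intro l
  induction l with
  | nil => intro vis level q sec _ _ h3 h4; exact ⟨vis, level, q, rfl, h3, h4⟩
  | cons g l' ih =>
    intro vis level q sec h1 h2 h3 h4
    by_cases hg : g ∈ vis
    · have hA : bfsVisit graph f (vis, level, q, sec) g = (vis, level, q, sec) := by
        simp [bfsVisit, hg]
      rw [List.foldl_cons, hA]
      exact ih vis level q sec h1 h2 h3 h4
    · have hfg : f ≠ g := fun h => hg (h ▸ h1)
      have hsec : ((PySem.Dict.getD level f 0 + 1 : Int) == 2) = false := by
        simp only [beq_eq_false_iff_ne]; omega
      have hA : bfsVisit graph f (vis, level, q, sec) g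
          = (PySem.Set.add vis g, PySem.Dict.insert level g (PySem.Dict.getD level f 0 + 1),
             q ++ [g], sec) := by
        simp [bfsVisit, hg, hsec]
      rw [List.foldl_cons, hA]
      exact ih (PySem.Set.add vis g)
        (PySem.Dict.insert level g (PySem.Dict.getD level f 0 + 1)) (q ++ [g]) sec
        ((PySem.Set.mem_add _ _ _).2 (Or.inl h1))
        (by rw [PySem.Dict.getD_insert_of_ne _ _ _ hfg]; exact h2)
        (by intro x hx
            rcases List.mem_append.1 hx with hx | hx
            · exact (PySem.Set.mem_add _ _ _).2 (Or.inl (h3 x hx))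
            · simp at hx; subst hx; exact (PySem.Set.mem_add _ _ _).2 (Or.inr rfl))
        (by intro x hx
            rcases List.mem_append.1 hx with hx | hx
            · have hxg : x ≠ g := fun h => hg (h ▸ h3 x hx)
              rw [PySem.Dict.getD_insert_of_ne _ _ _ hxg]; exact h4 x hx
            · simp at hx; subst hx; rw [PySem.Dict.getD_insert_self]; omega)

lemma pv_phase2 (graph : List (Int × List Int)) :
    ∀ (fuel : Nat) (vis : PySem.Set Int) (level : PySem.Dict Int Int) (q : List Int)
      (sec : PySem.Set Int),
      (∀ x ∈ q, x ∈ vis) → (∀ x ∈ q, 2 ≤ PySem.Dict.getD level x 0) →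
      bfsLoop graph fuel (vis, level, q, sec) = sec := by
  intro fuel
  induction fuel with
  | zero => intro vis level q sec _ _; rfl
  | succ fu ih =>
    intro vis level q sec h1 h2
    cases q with
    | nil => rfl
    | cons f rest =>
      obtain ⟨vis', level', q', heq, hsub, hlev⟩ :=
        pv_phase2_inner graph f (pvAdj graph f) vis level rest sec
          (h1 f List.mem_cons_self) (h2 f List.mem_cons_self)
          (fun x hx => h1 x (List.mem_cons_of_mem _ hx))
          (fun x hx => h2 x (List.mem_cons_of_mem _ hx))
      show bfsLoop graph fu _ = sec
      rw [heq]
      exact ih vis' level' q' sec hsub hlev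

-- Processing one level-1 node f: A's inner for-loop does exactly B's hopStep fold,
-- appending the newly found level-2 nodes to the queue.
lemma pv_hop_inner (graph : List (Int × List Int)) (blocked : PySem.Set Int) (f : Int) :
    ∀ (l : List Int) (vis : PySem.Set Int) (level : PySem.Dict Int Int) (q : List Int)
      (sec : PySem.Set Int),
      f ∈ vis → PySem.Dict.getD level f 0 = 1 →
      (∀ x, x ∈ vis ↔ (x ∈ blocked ∨ x ∈ sec)) →
      (∀ x ∈ q, x ∈ vis) →
      ∃ vis' level' newq,
        List.foldl (bfsVisit graph f) (vis, level, q, sec) l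
          = (vis', level', q ++ newq, List.foldl (hopStep blocked) sec l)
        ∧ (∀ x, x ∈ vis' ↔ (x ∈ blocked ∨ x ∈ List.foldl (hopStep blocked) sec l))
        ∧ (∀ x ∈ q ++ newq, x ∈ vis')
        ∧ (∀ x ∈ q, PySem.Dict.getD level' x 0 = PySem.Dict.getD level x 0)
        ∧ (∀ x ∈ newq, PySem.Dict.getD level' x 0 = 2) := by
  intro l
  induction l with
  | nil =>
    intro vis level q sec _ _ h3 h4
    exact ⟨vis, level, [], by simp, h3, by simpa using h4, fun x _ => rfl, by simp⟩
  | cons g l' ih =>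
    intro vis level q sec h1 h2 h3 h4
    by_cases hg : g ∈ vis
    · -- A skips; B skips too, since g ∈ blocked or g ∈ sec
      have hA : bfsVisit graph f (vis, level, q, sec) g = (vis, level, q, sec) := by
        simp [bfsVisit, hg]
      have hB : hopStep blocked sec g = sec := by
        rcases (h3 g).1 hg with h | h <;>
          simp [hopStep, h]
      rw [List.foldl_cons, List.foldl_cons, hA, hB]
      exact ih vis level q sec h1 h2 h3 h4
    · have hgb : g ∉ blocked := fun h => hg ((h3 g).2 (Or.inl h))
      have hgs : g ∉ sec := fun h => hg ((h3 g).2 (Or.inr h))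
      have hfg : f ≠ g := fun h => hg (h ▸ h1)
      have hsec : ((PySem.Dict.getD level f 0 + 1 : Int) == 2) = true := by rw [h2]; decide
      have hA : bfsVisit graph f (vis, level, q, sec) g
          = (PySem.Set.add vis g, PySem.Dict.insert level g (PySem.Dict.getD level f 0 + 1),
             q ++ [g], PySem.Set.add sec g) := by
        simp [bfsVisit, hg, hsec]
      have hB : hopStep blocked sec g = PySem.Set.add sec g := by
        simp [hopStep, hgb, hgs]
      obtain ⟨vis', level', newq', heq, hinv, hsub, hpres, hnew⟩ :=
        ih (PySem.Set.add vis g) (PySem.Dict.insert level g (PySem.Dict.getD level f 0 + 1))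
          (q ++ [g]) (PySem.Set.add sec g)
          ((PySem.Set.mem_add _ _ _).2 (Or.inl h1))
          (by rw [PySem.Dict.getD_insert_of_ne _ _ _ hfg]; exact h2)
          (by intro x
              rw [PySem.Set.mem_add, PySem.Set.mem_add, h3 x]; tauto)
          (by intro x hx
              rcases List.mem_append.1 hx with hx | hx
              · exact (PySem.Set.mem_add _ _ _).2 (Or.inl (h4 x hx))
              · simp at hx; subst hx; exact (PySem.Set.mem_add _ _ _).2 (Or.inr rfl))
      refine ⟨vis', level', g :: newq', ?_, ?_, ?_, ?_, ?_⟩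
      · rw [List.foldl_cons, List.foldl_cons, hA, hB,
          show q ++ g :: newq' = (q ++ [g]) ++ newq' by simp]
        exact heq
      · intro x
        rw [List.foldl_cons, hB]
        exact hinv x
      · intro x hx
        apply hsub
        rcases List.mem_append.1 hx with hx | hx
        · exact List.mem_append.2 (Or.inl (List.mem_append.2 (Or.inl hx)))
        · rcases List.mem_cons.1 hx with hx | hx
          · subst hx; exact List.mem_append.2 (Or.inl (by simp))
          · exact List.mem_append.2 (Or.inr hx)
      · intro x hx
        have hxg : x ≠ g := fun h => hg (h ▸ h4 x hx)
        rw [hpres x (List.mem_append.2 (Or.inl hx)), PySem.Dict.getD_insert_of_ne _ _ _ hxg]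
      · intro x hx
        rcases List.mem_cons.1 hx with hx | hx
        · subst hx
          rw [hpres x (by simp), PySem.Dict.getD_insert_self, h2]
          norm_num
        · exact hnew x hx

-- Draining the level-1 queue prefix computes B's outer fold; the level-2 tail adds nothing.
lemma pv_phase1 (graph : List (Int × List Int)) (blocked : PySem.Set Int) :
    ∀ (q1 : List Int) (fuel : Nat) (q2 : List Int) (vis : PySem.Set Int)
      (level : PySem.Dict Int Int) (sec : PySem.Set Int),
      q1.length ≤ fuel →
      (∀ x, x ∈ vis ↔ (x ∈ blocked ∨ x ∈ sec)) →
      (∀ x ∈ q1, x ∈ vis) →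
      (∀ x ∈ q1, PySem.Dict.getD level x 0 = 1) →
      (∀ x ∈ q2, x ∈ vis) →
      (∀ x ∈ q2, PySem.Dict.getD level x 0 = 2) →
      bfsLoop graph fuel (vis, level, q1 ++ q2, sec)
        = List.foldl (hopInner graph blocked) sec q1 := by
  intro q1
  induction q1 with
  | nil =>
    intro fuel q2 vis level sec _ _ _ _ h5 h6
    simpa using pv_phase2 graph fuel vis level q2 sec h5 (fun x hx => by rw [h6 x hx])
  | cons f q1' ih =>
    intro fuel q2 vis level sec hfuel hinv hq1v hq1l hq2v hq2l
    cases fuel with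
    | zero => simp at hfuel
    | succ fu =>
      obtain ⟨vis', level', newq, heq, hinv', hsub', hpres', hnew'⟩ :=
        pv_hop_inner graph blocked f (pvAdj graph f) vis level (q1' ++ q2) sec
          (hq1v f List.mem_cons_self) (hq1l f List.mem_cons_self) hinv
          (fun x hx => by
            rcases List.mem_append.1 hx with hx | hx
            · exact hq1v x (List.mem_cons_of_mem _ hx)
            · exact hq2v x hx)
      show bfsLoop graph fu (List.foldl (bfsVisit graph f) (vis, level, q1' ++ q2, sec)
        (pvAdj graph f)) = List.foldl (hopInner graph blocked) sec (f :: q1')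
      rw [heq, List.append_assoc]
      rw [ih fu (q2 ++ newq) vis' level'
        (List.foldl (hopStep blocked) sec (pvAdj graph f))
        (by simpa using Nat.le_of_succ_le_succ hfuel) hinv'
        (fun x hx => hsub' x (by simp [hx]))
        (fun x hx => by
          rw [hpres' x (List.mem_append.2 (Or.inl hx))]
          exact hq1l x (List.mem_cons_of_mem _ hx))
        (fun x hx => hsub' x (by
          rcases List.mem_append.1 hx with hx | hx
          · simp [hx]
          · simp [hx]))
        (fun x hx => by
          rcases List.mem_append.1 hx with hx | hx
          · rw [hpres' x (List.mem_append.2 (Or.inr hx))]; exact hq2l x hx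
          · exact hnew' x hx)]
      rfl

-- The first BFS iteration (current = start, level 0) is exactly B's collectDirect fold.
lemma pv_phase0 (graph : List (Int × List Int)) (start : Int) :
    ∀ (l : List Int) (b : PySem.Set Int) (d : List Int) (level : PySem.Dict Int Int)
      (sec : PySem.Set Int),
      start ∈ b →
      PySem.Dict.getD level start 0 = 0 →
      (∀ x ∈ d, PySem.Dict.getD level x 0 = 1) →
      (∀ x ∈ d, x ∈ b) →
      ∃ level',
        List.foldl (bfsVisit graph start) (b, level, d, sec) l
          = ((List.foldl collectDirect (b, d) l).1, level',
             (List.foldl collectDirect (b, d) l).2, sec)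
        ∧ (∀ x ∈ (List.foldl collectDirect (b, d) l).2, PySem.Dict.getD level' x 0 = 1)
        ∧ (∀ x ∈ (List.foldl collectDirect (b, d) l).2, x ∈ (List.foldl collectDirect (b, d) l).1)
        ∧ (List.foldl collectDirect (b, d) l).2.length ≤ d.length + l.length := by
  intro l
  induction l with
  | nil =>
    intro b d level sec _ _ h3 h4
    exact ⟨level, rfl, h3, h4, by simp⟩
  | cons f l' ih =>
    intro b d level sec h1 h2 h3 h4
    by_cases hf : f ∈ b
    · have hA : bfsVisit graph start (b, level, d, sec) f = (b, level, d, sec) := by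
        simp [bfsVisit, hf]
      have hB : collectDirect (b, d) f = (b, d) := by
        simp [collectDirect, hf]
      rw [List.foldl_cons, List.foldl_cons, hA, hB]
      obtain ⟨level', heq, ha, hb', hc⟩ := ih b d level sec h1 h2 h3 h4
      exact ⟨level', heq, ha, hb', by simp at hc ⊢; omega⟩
    · have hsf : start ≠ f := fun h => hf (h ▸ h1)
      have hsec : ((PySem.Dict.getD level start 0 + 1 : Int) == 2) = false := by
        rw [h2]; decide
      have hA : bfsVisit graph start (b, level, d, sec) f
          = (PySem.Set.add b f, PySem.Dict.insert level f (PySem.Dict.getD level start 0 + 1),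
             d ++ [f], sec) := by
        simp [bfsVisit, hf, hsec]
      have hB : collectDirect (b, d) f = (PySem.Set.add b f, d ++ [f]) := by
        simp [collectDirect, hf]
      rw [List.foldl_cons, List.foldl_cons, hA, hB]
      obtain ⟨level', heq, ha, hb', hc⟩ :=
        ih (PySem.Set.add b f) (d ++ [f])
          (PySem.Dict.insert level f (PySem.Dict.getD level start 0 + 1)) sec
          ((PySem.Set.mem_add _ _ _).2 (Or.inl h1))
          (by rw [PySem.Dict.getD_insert_of_ne _ _ _ hsf]; exact h2)
          (by intro x hx
              rcases List.mem_append.1 hx with hx | hx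
              · have hxf : x ≠ f := fun h => hf (h ▸ h4 x hx)
                rw [PySem.Dict.getD_insert_of_ne _ _ _ hxf]; exact h3 x hx
              · simp at hx; subst hx; rw [PySem.Dict.getD_insert_self, h2]; norm_num)
          (by intro x hx
              rcases List.mem_append.1 hx with hx | hx
              · exact (PySem.Set.mem_add _ _ _).2 (Or.inl (h4 x hx))
              · simp at hx; subst hx; exact (PySem.Set.mem_add _ _ _).2 (Or.inr rfl))
      exact ⟨level', heq, ha, hb', by simp at hc ⊢; omega⟩

-- ===== VERDICT (by name: the statement is the Claim_ definition above) =====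
theorem friends_second_level_spec : Claim_equal_friends_second_level := by
  intro start graph _
  show friends_second_level start graph = friends_second_level_alt start graph
  unfold friends_second_level friends_second_level_alt
  obtain ⟨level1, heq, hlev1, hsub1, hlen1⟩ :=
    pv_phase0 graph start (pvAdj graph start) (PySem.Set.ofList [start]) []
      (PySem.Dict.insert PySem.Dict.empty start 0) PySem.Set.empty
      (by simp [PySem.Set.mem_ofList])
      (PySem.Dict.getD_insert_self _ _ _ _)
      (by simp) (by simp)
  have hstep1 : bfsLoop graph
      ((pvAdj graph start).length + graph.foldl (fun a p => a + 1 + p.2.length) 0 + 1)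
      (PySem.Set.ofList [start], PySem.Dict.insert PySem.Dict.empty start 0, [start],
        PySem.Set.empty)
      = bfsLoop graph ((pvAdj graph start).length + graph.foldl (fun a p => a + 1 + p.2.length) 0)
        (List.foldl (bfsVisit graph start)
          (PySem.Set.ofList [start], PySem.Dict.insert PySem.Dict.empty start 0, [],
            PySem.Set.empty)
          (pvAdj graph start)) := rfl
  rw [hstep1, heq]
  have hmain := pv_phase1 graph
    (List.foldl collectDirect (PySem.Set.ofList [start], []) (pvAdj graph start)).1
    (List.foldl collectDirect (PySem.Set.ofList [start], []) (pvAdj graph start)).2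
    ((pvAdj graph start).length + graph.foldl (fun a p => a + 1 + p.2.length) 0)
    [] (List.foldl collectDirect (PySem.Set.ofList [start], []) (pvAdj graph start)).1 level1
    PySem.Set.empty
    (by simp at hlen1; omega)
    (by intro x; simp [PySem.Set.empty])
    hsub1 hlev1 (by simp) (by simp)
  rw [List.append_nil] at hmain
  exact hmain
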